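-- pv_equiv track=rewrite | github.com/programmers-algorithm-study-team5/code-review | 이승현/2주차/크레인 인형뽑기 게임.py | solution
-- ===== SOURCE A (Python) =====
-- def solution(board, moves):
--     board = [list(filter(None, row[::-1])) for row in zip(*board)]
--     answer, stack = 0, []
--     for m in moves:
--         if not board[m-1]: continue
--         curr = board[m-1].pop()
--         if stack and stack[-1] == curr:
--             stack.pop();
--             answer += 2
--         else : stack.append(curr)
--     return answer
-- ===== SOURCE B (Python) =====
-- def solution(board, moves):
--     grid = [row[:] for row in board]
--     answer, stack = 0, []
--     for m in moves:
--         c = m - 1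
--         for r in range(len(grid)):
--             v = grid[r][c]
--             if v:
--                 grid[r][c] = 0
--                 if stack and stack[-1] == v:
--                     stack.pop()
--                     answer += 2
--                 else:
--                     stack.append(v)
--                 break
--     return answer
-- ===== Notes on version B (the rewrite author's own statement) =====
-- stated objective: alternative
-- what changed: A pre-builds per-column stacks by transposing, reversing and filtering the whole board and then pops from them; B keeps the board as a plain matrix copy and, per move, scans the column top-to-bottom for the first nonzero cell and zeroes it.
-- outside the precondition, e.g. on solution([[1, 2, 3], [4, 2]], [0, 0]): A returns 2, B returns 0
import Mathlib
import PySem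

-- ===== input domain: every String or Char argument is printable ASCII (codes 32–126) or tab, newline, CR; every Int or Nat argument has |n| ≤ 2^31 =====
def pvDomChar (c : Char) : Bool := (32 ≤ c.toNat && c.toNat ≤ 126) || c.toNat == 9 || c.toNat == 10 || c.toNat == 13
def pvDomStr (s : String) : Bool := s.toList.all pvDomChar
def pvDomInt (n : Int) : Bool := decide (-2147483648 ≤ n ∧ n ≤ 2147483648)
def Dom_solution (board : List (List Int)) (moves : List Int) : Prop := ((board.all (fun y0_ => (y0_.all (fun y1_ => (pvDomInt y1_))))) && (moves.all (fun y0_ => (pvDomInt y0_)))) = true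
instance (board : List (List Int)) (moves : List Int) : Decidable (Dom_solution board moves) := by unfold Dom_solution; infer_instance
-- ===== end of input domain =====

-- B keeps the board as a plain matrix and scans each moved column for its first nonzero
-- cell, instead of A's transpose-reverse-filter pre-built column stacks (alternative
-- decomposition, same cost; equivalence proved on rectangular boards with in-range moves).

-- ===== PORT A =====
-- zip(*board): truncates to the shortest row; zip() of an empty board is empty
def pyTranspose (g : List (List Int)) : List (List Int) :=
  match g with
  | [] => []
  | r :: rs =>
    if h : r ≠ [] ∧ rs.all (fun q => !q.isEmpty)
    then (r.head h.1 :: rs.map (fun q => q.headD 0)) :: pyTranspose (r.tail :: rs.map List.tail)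
    else []
  termination_by (g.headD []).length
  decreasing_by
    have := List.length_pos_iff.mpr h.1
    simp only [List.headD_cons, List.length_tail]
    omega

-- one iteration of A's 'for m in moves' loop on the state (answer, stack, board)
def stepA (s : Int × List Int × List (List Int)) (m : Int) : Int × List Int × List (List Int) :=
  match PySem.List.pyGet? s.2.2 (m - 1) with
  | none => s            -- board[m-1] raises IndexError: outside Pre_
  | some col =>
    if col.isEmpty then s     -- 'if not board[m-1]: continue'
    else
      match PySem.List.pop? col with   -- board[m-1].pop()
      | none => s
      | some (curr, col') =>
        let bd := PySem.List.pySetD s.2.2 (m - 1) col'   -- the pop mutates board[m-1]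
        if s.2.1.getLast? = some curr then (s.1 + 2, s.2.1.dropLast, bd)
        else (s.1, s.2.1 ++ [curr], bd)

def solution (board : List (List Int)) (moves : List Int) : Int :=
  -- board = [list(filter(None, row[::-1])) for row in zip(*board)]  (row[::-1] = reverse)
  (moves.foldl stepA
    (0, [], (pyTranspose board).map (fun col => col.reverse.filter (fun x => x != 0)))).1

-- ===== PORT B =====
-- B's inner 'for r in range(len(grid))' loop: first row whose cell in column c is
-- nonzero; returns that value and the grid with the cell zeroed, none if no break fired
-- (or, outside Pre_, where grid[r][c] would raise)
def popCol : List (List Int) → Int → Option (Int × List (List Int))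
  | [], _ => none
  | row :: rest, c =>
    match PySem.List.pyGet? row c with
    | none => none        -- grid[r][c] raises IndexError: outside Pre_
    | some v =>
      if v != 0 then some (v, PySem.List.pySetD row c 0 :: rest)
      else
        match popCol rest c with
        | none => none
        | some (v', g) => some (v', row :: g)

-- one iteration of B's 'for m in moves' loop
def stepB (s : Int × List Int × List (List Int)) (m : Int) : Int × List Int × List (List Int) :=
  match popCol s.2.2 (m - 1) with
  | none => s
  | some (v, g) =>
    if s.2.1.getLast? = some v then (s.1 + 2, s.2.1.dropLast, g)
    else (s.1, s.2.1 ++ [v], g)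

def solution_alt (board : List (List Int)) (moves : List Int) : Int :=
  (moves.foldl stepB (0, [], board)).1

-- ===== PRECONDITION & SPEC =====
-- Pre_ excludes ragged boards — A's zip() silently truncates them to the shortest row,
-- an artefact on which the natural B reads the full rows and can raise or differ — and
-- moves whose column index falls outside Python's wrap range [1-w, w], where A raises
-- IndexError (w = row width; an empty board forces moves = []).
def Pre_solution (board : List (List Int)) (moves : List Int) : Prop :=
  (∀ row ∈ board, row.length = (board.headD []).length) ∧
  (∀ m ∈ moves, 1 - ((board.headD []).length : Int) ≤ m ∧ m ≤ ((board.headD []).length : Int))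
instance (board : List (List Int)) (moves : List Int) : Decidable (Pre_solution board moves) := by unfold Pre_solution; infer_instance

def pvWitness_solution : List (List Int) × List Int := ([[0, 0], [1, 2]], [1, 2, 1])

def Spec_solution (board : List (List Int)) (moves : List Int) (out : Int) : Prop := out = solution_alt board moves
instance (board : List (List Int)) (moves : List Int) (out : Int) : Decidable (Spec_solution board moves out) := by unfold Spec_solution; infer_instance

-- ===== CLAIM (what is proved, stated in full; the proofs are below) =====
def Claim_equal_solution : Prop := ∀ (board : List (List Int)) (moves : List Int), Dom_solution board moves → Pre_solution board moves → Spec_solution board moves (solution board moves)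

-- ===== LEMMAS AND PROOFS =====

-- column j of the grid, read top to bottom (rows all have length > j under Pre_)
def getCol (g : List (List Int)) (j : Nat) : List Int := g.map (fun row => row.getD j 0)

-- A's representation of one column: reversed then zeros filtered out
def fcol (col : List Int) : List Int := col.reverse.filter (fun x => x != 0)

-- A's whole board state as a function of B's grid
def colsOf (w : Nat) (g : List (List Int)) : List (List Int) :=
  (List.range w).map (fun j => fcol (getCol g j))

-- Python's resolution of (possibly negative) index c in a list of length w
def jOf (w : Nat) (c : Int) : Nat := (if c < 0 then c + w else c).toNat

-- nat-index version of popCol (popCol_eq_popColN bridges them under Pre_)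
def popColN : List (List Int) → Nat → Option (Int × List (List Int))
  | [], _ => none
  | row :: rest, j =>
    let v := row.getD j 0
    if v != 0 then some (v, row.set j 0 :: rest)
    else
      match popColN rest j with
      | none => none
      | some (v', g) => some (v', row :: g)

lemma jOf_lt {w : Nat} {c : Int} (h1 : -(w : Int) ≤ c) (h2 : c < w) : jOf w c < w := by
  unfold jOf; split <;> omega

lemma pyGet?_eq_getD {α : Type} {xs : List α} {w : Nat} {c : Int} (d : α) (hl : xs.length = w)
    (h1 : -(w : Int) ≤ c) (h2 : c < w) :
    PySem.List.pyGet? xs c = some (xs.getD (jOf w c) d) := by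
  by_cases hc : 0 ≤ c
  · rw [PySem.List.pyGet?_of_nonneg xs hc]
    have hj : jOf w c = c.toNat := by unfold jOf; rw [if_neg (by omega)]
    rw [hj, List.getD_eq_getElem?_getD, List.getElem?_eq_getElem (by omega)]
    simp
  · have hk : c = -((-c).toNat : Int) := by omega
    conv_lhs => rw [hk]
    rw [PySem.List.pyGet?_neg_natCast xs (-c).toNat (by omega) (by omega)]
    have hj : jOf w c = xs.length - (-c).toNat := by
      unfold jOf; rw [if_pos (by omega)]; omega
    rw [hj, List.getD_eq_getElem?_getD, List.getElem?_eq_getElem (by omega)]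
    simp

lemma pySetD_eq_set {α : Type} {xs : List α} {w : Nat} {c : Int} (v : α) (hl : xs.length = w)
    (h1 : -(w : Int) ≤ c) (h2 : c < w) :
    PySem.List.pySetD xs c v = xs.set (jOf w c) v := by
  by_cases hc : 0 ≤ c
  · rw [PySem.List.pySetD_of_nonneg xs v hc]
    unfold jOf; rw [if_neg (by omega)]
  · have hj : jOf w c = xs.length - (-c).toNat := by
      unfold jOf; rw [if_pos (by omega)]; omega
    rw [hj]
    simp only [PySem.List.pySetD, PySem.List.pySet?, PySem.List.pyIdx?]
    rw [if_neg hc, if_pos (by omega)]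
    rfl

lemma popCol_eq_popColN {w : Nat} {c : Int} (h1 : -(w : Int) ≤ c) (h2 : c < w) :
    ∀ g : List (List Int), (∀ row ∈ g, row.length = w) →
    popCol g c = popColN g (jOf w c) := by
  intro g
  induction g with
  | nil => intro _; rfl
  | cons row rest ih =>
    intro hw
    have hr : row.length = w := hw row (by simp)
    rw [popCol, popColN, pyGet?_eq_getD 0 hr h1 h2, pySetD_eq_set 0 hr h1 h2,
      ih (fun q hq => hw q (by simp [hq]))]

lemma popColN_cons (row : List Int) (rest : List (List Int)) (j : Nat) :
    popColN (row :: rest) j =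
      if row.getD j 0 = 0 then
        match popColN rest j with
        | none => none
        | some (v', g) => some (v', row :: g)
      else some (row.getD j 0, row.set j 0 :: rest) := by
  rw [popColN]
  by_cases h : row.getD j 0 = 0 <;> simp [h]

lemma fcol_cons (a : Int) (l : List Int) :
    fcol (a :: l) = fcol l ++ if a = 0 then [] else [a] := by
  by_cases h : a = 0 <;> simp [fcol, List.filter_append, h]

lemma getCol_cons (row : List Int) (rest : List (List Int)) (j : Nat) :
    getCol (row :: rest) j = row.getD j 0 :: getCol rest j := rfl

lemma getD_set_self (row : List Int) (j : Nat) : (row.set j 0).getD j 0 = 0 := by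
  rw [List.getD_eq_getElem?_getD]
  by_cases hj : j < row.length
  · rw [List.getElem?_set_self (by simpa using hj)]; rfl
  · rw [List.getElem?_eq_none (by simpa using hj)]; rfl

lemma getD_set_ne (row : List Int) (i j : Nat) (h : i ≠ j) :
    (row.set j 0).getD i 0 = row.getD i 0 := by
  rw [List.getD_eq_getElem?_getD, List.getD_eq_getElem?_getD,
    List.getElem?_set_ne (by omega)]

lemma popColN_none {j : Nat} :
    ∀ g : List (List Int), popColN g j = none → fcol (getCol g j) = [] := by
  intro g
  induction g with
  | nil => intro _; rfl
  | cons row rest ih =>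
    intro h
    rw [popColN_cons] at h
    by_cases hv : row.getD j 0 = 0
    · rw [if_pos hv] at h
      rcases hh : popColN rest j with _ | p
      · rw [getCol_cons, fcol_cons, ih hh, if_pos hv]; rfl
      · rw [hh] at h; exact absurd h (by simp)
    · rw [if_neg hv] at h; exact absurd h (by simp)

lemma popColN_some {w : Nat} {j : Nat} :
    ∀ (g : List (List Int)) (g' : List (List Int)) (v : Int), (∀ row ∈ g, row.length = w) →
    popColN g j = some (v, g') →
      fcol (getCol g j) = fcol (getCol g' j) ++ [v] ∧
      (∀ i, i ≠ j → getCol g' i = getCol g i) ∧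
      (∀ row ∈ g', row.length = w) := by
  intro g
  induction g with
  | nil => intro g' v _ h; exact absurd h (by simp [popColN])
  | cons row rest ih =>
    intro g' v hw h
    rw [popColN_cons] at h
    by_cases hv : row.getD j 0 = 0
    · rw [if_pos hv] at h
      rcases hh : popColN rest j with _ | ⟨v0, g0⟩
      · rw [hh] at h; exact absurd h (by simp)
      · rw [hh] at h
        simp only [Option.some.injEq, Prod.mk.injEq] at h
        obtain ⟨h1, h2⟩ := h
        subst h1; subst h2
        obtain ⟨e1, e2, e3⟩ := ih g0 v0 (fun q hq => hw q (by simp [hq])) hh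
        refine ⟨?_, ?_, ?_⟩
        · rw [getCol_cons, getCol_cons, fcol_cons, fcol_cons, if_pos hv]
          simp [e1]
        · intro i hi
          rw [getCol_cons, getCol_cons, e2 i hi]
        · intro q hq
          rcases List.mem_cons.mp hq with rfl | hq
          · exact hw q (by simp)
          · exact e3 q hq
    · rw [if_neg hv] at h
      simp only [Option.some.injEq, Prod.mk.injEq] at h
      obtain ⟨h1, h2⟩ := h
      subst h1; subst h2
      refine ⟨?_, ?_, ?_⟩
      · rw [getCol_cons, getCol_cons, fcol_cons, fcol_cons, if_neg hv,
          getD_set_self, if_pos rfl]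
        simp
      · intro i hi
        rw [getCol_cons, getCol_cons, getD_set_ne row i j hi]
      · intro q hq
        rcases List.mem_cons.mp hq with rfl | hq
        · simpa using hw row (by simp)
        · exact hw q (by simp [hq])

lemma headD_eq_getD (q : List Int) : q.headD 0 = q.getD 0 0 := by cases q <;> rfl

lemma head_eq_getD (r : List Int) (h : r ≠ []) : r.head h = r.getD 0 0 := by
  cases r with
  | nil => exact absurd rfl h
  | cons a l => rfl

lemma tail_getD (q : List Int) (j : Nat) : q.tail.getD j 0 = q.getD (j + 1) 0 := by
  cases q <;> rfl

lemma pyTranspose_eq : ∀ (w : Nat) (g : List (List Int)), g ≠ [] →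
    (∀ row ∈ g, row.length = w) →
    pyTranspose g = (List.range w).map (fun j => getCol g j) := by
  intro w
  induction w with
  | zero =>
    intro g hne hw
    obtain ⟨r, rs, rfl⟩ := List.exists_cons_of_ne_nil hne
    have hr : r = [] := List.eq_nil_of_length_eq_zero (hw r (by simp))
    rw [pyTranspose, dif_neg (by simp [hr])]
    simp
  | succ w ih =>
    intro g hne hw
    obtain ⟨r, rs, rfl⟩ := List.exists_cons_of_ne_nil hne
    have hr : r ≠ [] := by
      intro h; have := hw r (by simp); rw [h] at this; simp at this
    have hrs : ∀ q ∈ rs, q ≠ [] := by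
      intro q hq h; have := hw q (by simp [hq]); rw [h] at this; simp at this
    have hcond : r ≠ [] ∧ rs.all (fun q => !q.isEmpty) := by
      refine ⟨hr, ?_⟩
      rw [List.all_eq_true]
      intro q hq
      simpa [List.isEmpty_iff] using hrs q hq
    rw [pyTranspose, dif_pos hcond]
    have htl : ∀ row ∈ (r.tail :: rs.map List.tail), row.length = w := by
      intro row hrow
      rcases List.mem_cons.mp hrow with rfl | hrow
      · have := hw r (by simp); simp [List.length_tail]; omega
      · obtain ⟨q, hq, rfl⟩ := List.mem_map.mp hrow
        have := hw q (by simp [hq]); simp [List.length_tail]; omega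
    rw [ih (r.tail :: rs.map List.tail) (by simp) htl]
    rw [List.range_succ_eq_map, List.map_cons, List.map_map]
    congr 1
    · simp only [getCol, List.map_cons, List.cons.injEq]
      constructor
      · exact head_eq_getD r hr
      · apply List.map_congr_left
        intro q hq
        exact headD_eq_getD q
    · apply List.map_congr_left
      intro j hj
      simp only [Function.comp_apply, getCol, List.map_cons]
      congr 1
      · exact tail_getD r j
      · rw [List.map_map]
        apply List.map_congr_left
        intro q hq
        exact tail_getD q j

lemma boardA_eq {w : Nat} (board : List (List Int)) (hw : ∀ row ∈ board, row.length = w)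
    (he : board = [] → w = 0) :
    (pyTranspose board).map (fun col => col.reverse.filter (fun x => x != 0)) =
      colsOf w board := by
  by_cases hne : board = []
  · subst hne
    rw [he rfl, pyTranspose]
    rfl
  · rw [pyTranspose_eq w board hne hw, List.map_map]
    rfl

lemma colsOf_set {w j : Nat} (g g' : List (List Int)) (l : List Int) (hj : j < w)
    (hjcol : fcol (getCol g' j) = l)
    (hoth : ∀ i, i ≠ j → getCol g' i = getCol g i) :
    (colsOf w g).set j l = colsOf w g' := by
  apply List.ext_getElem
  · simp [colsOf]
  · intro i h1 h2
    have hi : i < w := by simpa [colsOf] using h2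
    rw [List.getElem_set]
    by_cases hij : i = j
    · subst hij
      rw [if_pos rfl]
      simp [colsOf, hjcol]
    · rw [if_neg (fun h => hij h.symm)]
      simp only [colsOf, List.getElem_map, List.getElem_range]
      rw [hoth i hij]

lemma colsOf_getD {w j : Nat} (g : List (List Int)) (hj : j < w) :
    (colsOf w g).getD j [] = fcol (getCol g j) := by
  exact PySem.List.getD_map_range _ w j [] hj

lemma length_colsOf (w : Nat) (g : List (List Int)) : (colsOf w g).length = w := by
  simp [colsOf]

lemma loop_inv {w : Nat} : ∀ (moves : List Int) (ans : Int) (stack : List Int)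
    (g : List (List Int)), (∀ row ∈ g, row.length = w) →
    (∀ m ∈ moves, 1 - (w : Int) ≤ m ∧ m ≤ (w : Int)) →
    moves.foldl stepA (ans, stack, colsOf w g) =
      ((moves.foldl stepB (ans, stack, g)).1, (moves.foldl stepB (ans, stack, g)).2.1,
        colsOf w (moves.foldl stepB (ans, stack, g)).2.2) := by
  intro moves
  induction moves with
  | nil => intro ans stack g _ _; rfl
  | cons m ms ih =>
    intro ans stack g hw hm
    obtain ⟨hm1, hm2⟩ := hm m (by simp)
    have hc1 : -(w : Int) ≤ m - 1 := by omega
    have hc2 : m - 1 < (w : Int) := by omega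
    have hj : jOf w (m - 1) < w := jOf_lt hc1 hc2
    rw [List.foldl_cons, List.foldl_cons]
    have hbridge := popCol_eq_popColN hc1 hc2 g hw
    have hsB : stepB (ans, stack, g) m = match popColN g (jOf w (m - 1)) with
        | none => (ans, stack, g)
        | some (v, g') =>
          if stack.getLast? = some v then (ans + 2, stack.dropLast, g')
          else (ans, stack ++ [v], g') := by
      simp only [stepB]
      rw [hbridge]
    have hget : PySem.List.pyGet? (colsOf w g) (m - 1) =
        some (fcol (getCol g (jOf w (m - 1)))) := by
      rw [pyGet?_eq_getD [] (length_colsOf w g) hc1 hc2, colsOf_getD g hj]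
    rcases hpop : popColN g (jOf w (m - 1)) with _ | ⟨v, g'⟩
    · -- empty column: both skip
      have hemp := popColN_none g hpop
      have hsA : stepA (ans, stack, colsOf w g) m = (ans, stack, colsOf w g) := by
        simp only [stepA]
        rw [hget, hemp]
        rfl
      have hsB' : stepB (ans, stack, g) m = (ans, stack, g) := by
        rw [hsB, hpop]
      rw [hsA, hsB']
      exact ih ans stack g hw (fun x hx => hm x (by simp [hx]))
    · obtain ⟨e1, e2, e3⟩ := popColN_some g g' v hw hpop
      have hsA : stepA (ans, stack, colsOf w g) m =
          (if stack.getLast? = some v then (ans + 2, stack.dropLast, colsOf w g')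
           else (ans, stack ++ [v], colsOf w g')) := by
        have hset : PySem.List.pySetD (colsOf w g) (m - 1) (fcol (getCol g' (jOf w (m - 1)))) =
            colsOf w g' := by
          rw [pySetD_eq_set _ (length_colsOf w g) hc1 hc2]
          exact colsOf_set g g' _ hj rfl e2
        simp only [stepA]
        rw [hget, e1]
        simp [PySem.List.pop?_last, hset]
      have hsB' : stepB (ans, stack, g) m =
          (if stack.getLast? = some v then (ans + 2, stack.dropLast, g')
           else (ans, stack ++ [v], g')) := by
        rw [hsB, hpop]
      rw [hsA, hsB']
      by_cases htop : stack.getLast? = some v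
      · rw [if_pos htop, if_pos htop]
        exact ih _ _ g' e3 (fun x hx => hm x (by simp [hx]))
      · rw [if_neg htop, if_neg htop]
        exact ih _ _ g' e3 (fun x hx => hm x (by simp [hx]))

-- ===== VERDICT (by name: the statement is the Claim_ definition above) =====
theorem solution_spec : Claim_equal_solution := by
  intro board moves _ hpre
  obtain ⟨hw, hm⟩ := hpre
  unfold Spec_solution solution solution_alt
  rw [boardA_eq board hw (by intro h; simp [h])]
  rw [loop_inv moves 0 [] board hw hm]
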